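-- pv_equiv track=rewrite | github.com/atdyer/alloy-lib | sparse/new/ellcsr_inplace.py | ellcsrip
-- ===== SOURCE A (Python) =====
-- def ellcsrip(cols, vals, nrows, maxnz):
--
--     IA = [0] * (nrows + 1)
--     kpos = 0
--
--     for i in range(nrows):
--         for k in range(maxnz):
--             idx = i * maxnz + k
--             if cols[idx] != -1:
--                 vals[kpos] = vals[idx]
--                 cols[kpos] = cols[idx]
--                 kpos += 1
--             IA[i+1] = kpos
--     return vals, cols, IA
-- ===== SOURCE B (Python) =====
-- def ellcsrip(cols, vals, nrows, maxnz):
--     # Pass 1: build IA alone as a prefix sum of per-row non-padding counts.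
--     IA = [0] * (nrows + 1)
--     for i in range(nrows):
--         cnt = 0
--         for k in range(maxnz):
--             if cols[i * maxnz + k] != -1:
--                 cnt += 1
--         IA[i + 1] = IA[i] + cnt
--     # Pass 2: compact vals/cols in place with a running write cursor.
--     kpos = 0
--     for i in range(nrows):
--         for k in range(maxnz):
--             idx = i * maxnz + k
--             if cols[idx] != -1:
--                 vals[kpos] = vals[idx]
--                 cols[kpos] = cols[idx]
--                 kpos += 1
--     return vals, cols, IA
-- ===== Notes on version B (the rewrite author's own statement) =====
-- stated objective: alternative
-- what changed: Splits A's single fused scan (which rewrites IA[i+1] on every inner step while compacting) into two separate passes: a counting pass that builds IA as a prefix sum of per-row non-padding counts, then a compaction pass over vals/cols that never touches IA.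
import Mathlib
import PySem

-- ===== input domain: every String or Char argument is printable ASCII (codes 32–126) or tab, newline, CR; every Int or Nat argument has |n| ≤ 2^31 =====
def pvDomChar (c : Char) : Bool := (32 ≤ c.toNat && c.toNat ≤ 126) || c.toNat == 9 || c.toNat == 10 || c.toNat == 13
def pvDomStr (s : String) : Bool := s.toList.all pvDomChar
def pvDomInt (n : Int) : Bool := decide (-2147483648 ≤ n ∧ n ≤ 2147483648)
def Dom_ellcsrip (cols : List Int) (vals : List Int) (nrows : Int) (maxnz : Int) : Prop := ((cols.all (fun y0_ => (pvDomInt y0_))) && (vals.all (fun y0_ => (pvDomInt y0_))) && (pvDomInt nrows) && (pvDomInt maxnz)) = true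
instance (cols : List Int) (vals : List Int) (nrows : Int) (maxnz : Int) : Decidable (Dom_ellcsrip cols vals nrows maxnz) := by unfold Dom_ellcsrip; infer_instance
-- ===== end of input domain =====

-- B splits A's single fused scan into a counting pass that builds IA as a prefix sum,
-- then a separate compaction pass over vals/cols (objective: alternative decomposition;
-- equivalence is about the RETURN value; both Pythons perform the same in-place writes).

-- ===== PORT A =====
-- A's inner-loop body lifted to a named helper (state: vals, cols, IA, kpos).
def pvStepA (maxnz i : Int) (s : List Int × List Int × List Int × Int) (k : Int) : List Int × List Int × List Int × Int :=
  let idx := i * maxnz + k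
  let s1 := if PySem.List.pyGetD s.2.1 idx 0 ≠ -1 then
      (PySem.List.pySetD s.1 s.2.2.2 (PySem.List.pyGetD s.1 idx 0),
       PySem.List.pySetD s.2.1 s.2.2.2 (PySem.List.pyGetD s.2.1 idx 0),
       s.2.2.1, s.2.2.2 + 1)
    else s
  (s1.1, s1.2.1, PySem.List.pySetD s1.2.2.1 (i + 1) s1.2.2.2, s1.2.2.2)

def ellcsrip (cols : List Int) (vals : List Int) (nrows : Int) (maxnz : Int) : List Int × List Int × List Int :=
  let s := (PySem.List.pyRange 0 nrows 1).foldl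
    (fun s i => (PySem.List.pyRange 0 maxnz 1).foldl (pvStepA maxnz i) s)
    (vals, cols, List.replicate (nrows + 1).toNat 0, 0)
  (s.1, s.2.1, s.2.2.1)

-- ===== PORT B =====
-- B's compaction-loop body (state: vals, cols, kpos) — IA is never touched here.
def pvStepB (maxnz i : Int) (s : List Int × List Int × Int) (k : Int) : List Int × List Int × Int :=
  let idx := i * maxnz + k
  if PySem.List.pyGetD s.2.1 idx 0 ≠ -1 then
    (PySem.List.pySetD s.1 s.2.2 (PySem.List.pyGetD s.1 idx 0),
     PySem.List.pySetD s.2.1 s.2.2 (PySem.List.pyGetD s.2.1 idx 0),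
     s.2.2 + 1)
  else s

-- cnt of B's counting pass for row i (reads the ORIGINAL cols).
def pvCount (cols : List Int) (maxnz i : Int) : Int :=
  (PySem.List.pyRange 0 maxnz 1).foldl
    (fun cnt k => if PySem.List.pyGetD cols (i * maxnz + k) 0 ≠ -1 then cnt + 1 else cnt) 0

def ellcsrip_alt (cols : List Int) (vals : List Int) (nrows : Int) (maxnz : Int) : List Int × List Int × List Int :=
  let IA := (PySem.List.pyRange 0 nrows 1).foldl
    (fun IA i => PySem.List.pySetD IA (i + 1) (PySem.List.pyGetD IA i 0 + pvCount cols maxnz i))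
    (List.replicate (nrows + 1).toNat 0)
  let s := (PySem.List.pyRange 0 nrows 1).foldl
    (fun s i => (PySem.List.pyRange 0 maxnz 1).foldl (pvStepB maxnz i) s)
    (vals, cols, 0)
  (s.1, s.2.1, IA)

-- ===== PRECONDITION & SPEC =====
-- Pre_ excludes exactly the inputs on which Python A raises IndexError: some scanned slot
-- idx < nrows*maxnz is outside cols, or is non-padding but outside vals.
def Pre_ellcsrip (cols : List Int) (vals : List Int) (nrows : Int) (maxnz : Int) : Prop :=
  0 < nrows → 0 < maxnz →
    (nrows * maxnz).toNat ≤ cols.length ∧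
    ∀ idx < cols.length, (idx : Int) < nrows * maxnz →
      cols.getD idx 0 = -1 ∨ idx < vals.length
instance (cols : List Int) (vals : List Int) (nrows : Int) (maxnz : Int) : Decidable (Pre_ellcsrip cols vals nrows maxnz) := by unfold Pre_ellcsrip; infer_instance
def pvWitness_ellcsrip : List Int × List Int × Int × Int := ([0, -1, 2, -1], [10, 20, 30, 40], 2, 2)

def Spec_ellcsrip (cols : List Int) (vals : List Int) (nrows : Int) (maxnz : Int) (out : List Int × List Int × List Int) : Prop := out = ellcsrip_alt cols vals nrows maxnz
instance (cols : List Int) (vals : List Int) (nrows : Int) (maxnz : Int) (out : List Int × List Int × List Int) : Decidable (Spec_ellcsrip cols vals nrows maxnz out) := by unfold Spec_ellcsrip; infer_instance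

-- ===== CLAIM (what is proved, stated in full; the proofs are below) =====
def Claim_equal_ellcsrip : Prop := ∀ (cols : List Int) (vals : List Int) (nrows : Int) (maxnz : Int), Dom_ellcsrip cols vals nrows maxnz → Pre_ellcsrip cols vals nrows maxnz → Spec_ellcsrip cols vals nrows maxnz (ellcsrip cols vals nrows maxnz)

-- ===== LEMMAS AND PROOFS =====

lemma pv_foldl_const {α : Type} (l : List Int) (s : α) :
    l.foldl (fun s _ => s) s = s := by
  induction l generalizing s with
  | nil => rfl
  | cons k ks ih => simpa [List.foldl] using ih s

lemma pv_set_replicate_zero (m n : Nat) :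
    (List.replicate m (0 : Int)).set n 0 = List.replicate m 0 := by
  apply List.ext_getElem?
  intro j
  by_cases h : j = n <;> simp [List.getElem?_set, List.getElem?_replicate, h]

lemma pv_getD_replicate_zero (m j : Nat) :
    (List.replicate m (0 : Int)).getD j 0 = 0 := by
  by_cases h : j < m <;> simp [List.getD, List.getElem?_replicate, h]

lemma pv_pySetD_pySetD (IA : List Int) (i : Int) (hi : 0 ≤ i) (x y : Int) :
    PySem.List.pySetD (PySem.List.pySetD IA i x) i y = PySem.List.pySetD IA i y := by
  have hcast : (i : Int) = ((i.toNat : Nat) : Int) := by omega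
  rw [hcast, PySem.List.pySetD_natCast, PySem.List.pySetD_natCast, PySem.List.pySetD_natCast,
    List.set_set]

-- A's fused inner loop = B's compaction inner loop, plus one IA write at the end.
lemma pv_foldA_eq (maxnz i : Int) (hi : 0 ≤ i) :
    ∀ (ks : List Int) (v c IA : List Int) (kp : Int),
    ks.foldl (pvStepA maxnz i) (v, c, IA, kp)
      = ((ks.foldl (pvStepB maxnz i) (v, c, kp)).1,
         (ks.foldl (pvStepB maxnz i) (v, c, kp)).2.1,
         (if ks.isEmpty then IA
          else PySem.List.pySetD IA (i + 1) (ks.foldl (pvStepB maxnz i) (v, c, kp)).2.2),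
         (ks.foldl (pvStepB maxnz i) (v, c, kp)).2.2) := by
  intro ks
  induction ks with
  | nil => intro v c IA kp; simp [List.foldl]
  | cons k ks ih =>
    intro v c IA kp
    have hstep : pvStepA maxnz i (v, c, IA, kp) k
        = ((pvStepB maxnz i (v, c, kp) k).1,
           (pvStepB maxnz i (v, c, kp) k).2.1,
           PySem.List.pySetD IA (i + 1) (pvStepB maxnz i (v, c, kp) k).2.2,
           (pvStepB maxnz i (v, c, kp) k).2.2) := by
      simp only [pvStepA, pvStepB]
      split_ifs <;> rfl
    rcases h1 : pvStepB maxnz i (v, c, kp) k with ⟨v1, c1, kp1⟩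
    rw [List.foldl_cons, List.foldl_cons, hstep, h1, ih]
    rcases hks : ks with _ | ⟨k2, ks2⟩
    · simp [List.foldl]
    · simp only [List.isEmpty_cons, if_false, List.isEmpty_nil]
      rw [pv_pySetD_pySetD _ _ (by omega)]
      rfl

lemma pv_cnt_shift (cols0 : List Int) (maxnz i : Int) :
    ∀ (l : List Int) (c : Int),
    l.foldl (fun cnt k => if PySem.List.pyGetD cols0 (i * maxnz + k) 0 ≠ -1 then cnt + 1 else cnt) c
      = c + l.foldl (fun cnt k => if PySem.List.pyGetD cols0 (i * maxnz + k) 0 ≠ -1 then cnt + 1 else cnt) 0 := by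
  intro l
  induction l with
  | nil => intro c; simp [List.foldl]
  | cons k ks ih =>
    intro c
    rw [List.foldl_cons, List.foldl_cons,
      ih (if PySem.List.pyGetD cols0 (i * maxnz + k) 0 ≠ -1 then c + 1 else c),
      ih (if PySem.List.pyGetD cols0 (i * maxnz + k) 0 ≠ -1 then (0:Int) + 1 else 0)]
    split_ifs <;> ring

lemma pv_getD_set_ne (l : List Int) (m j : Nat) (x : Int) (h : m ≠ j) :
    (l.set m x).getD j 0 = l.getD j 0 := by
  simp [List.getD, List.getElem?_set_ne h]

lemma pv_getD_set_self (l : List Int) (m : Nat) (x : Int) (h : m < l.length) :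
    (l.set m x).getD m 0 = x := by
  simp [List.getD, h]

-- Invariants of B's compaction loop over one row: the write cursor stays ≤ the read
-- index, entries at positions not yet read keep their original values, and the cursor
-- advances by exactly the count of non-padding slots of the ORIGINAL cols.
lemma pv_row_aux (cols0 : List Int) (maxnz i : Int) (hi : 0 ≤ i) :
    ∀ (n : Nat), ∀ (a : Int), 0 ≤ a → a + n = maxnz →
    ∀ (v c : List Int) (kp : Int),
    c.length = cols0.length →
    (∀ j : Nat, i * maxnz + a ≤ (j : Int) → c.getD j 0 = cols0.getD j 0) →
    0 ≤ kp → kp ≤ i * maxnz + a →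
    ∀ p, p = (PySem.List.pyRange a maxnz 1).foldl (pvStepB maxnz i) (v, c, kp) →
    p.2.2 = kp + (PySem.List.pyRange a maxnz 1).foldl
        (fun cnt k => if PySem.List.pyGetD cols0 (i * maxnz + k) 0 ≠ -1 then cnt + 1 else cnt) 0
      ∧ p.2.1.length = cols0.length
      ∧ (∀ j : Nat, i * maxnz + maxnz ≤ (j : Int) → p.2.1.getD j 0 = cols0.getD j 0)
      ∧ 0 ≤ p.2.2 ∧ p.2.2 ≤ i * maxnz + maxnz := by
  intro n
  induction n with
  | zero =>
    intro a ha hsum v c kp hlen hget hkp0 hkp p hp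
    have hnil : PySem.List.pyRange a maxnz 1 = [] := PySem.List.pyRange_one_eq_nil (by omega)
    subst hp; rw [hnil]
    simp only [List.foldl_nil]
    exact ⟨by omega, hlen, fun j hj => hget j (by omega), hkp0, by omega⟩
  | succ m ih =>
    intro a ha hsum v c kp hlen hget hkp0 hkp p hp
    have hmznn : 0 ≤ maxnz := by omega
    have hidx0 : 0 ≤ i * maxnz := mul_nonneg hi hmznn
    have hcons := PySem.List.pyRange_one_cons (show a < maxnz by omega)
    have hcast : i * maxnz + a = (((i * maxnz + a).toNat : Nat) : Int) := by omega
    have hread : PySem.List.pyGetD c (i * maxnz + a) 0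
        = PySem.List.pyGetD cols0 (i * maxnz + a) 0 := by
      rw [hcast, PySem.List.pyGetD_natCast, PySem.List.pyGetD_natCast]
      exact hget (i * maxnz + a).toNat (by omega)
    rw [hcons, List.foldl_cons] at hp
    rw [hcons, List.foldl_cons]
    by_cases hc : PySem.List.pyGetD cols0 (i * maxnz + a) 0 = -1
    · -- padding slot: state unchanged, count unchanged
      have hstep : pvStepB maxnz i (v, c, kp) a = (v, c, kp) := by
        simp [pvStepB, hread, hc]
      rw [hstep] at hp
      obtain ⟨h1, h2, h3, h4, h5⟩ := ih (a + 1) (by omega) (by omega) v c kp hlen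
        (fun j hj => hget j (by omega)) hkp0 (by omega) p hp
      refine ⟨?_, h2, h3, h4, h5⟩
      rw [if_neg (fun hne => hne hc)]
      exact h1
    · -- non-padding slot: copy and advance the cursor
      have hstep : pvStepB maxnz i (v, c, kp) a
          = (PySem.List.pySetD v kp (PySem.List.pyGetD v (i * maxnz + a) 0),
             PySem.List.pySetD c kp (PySem.List.pyGetD c (i * maxnz + a) 0),
             kp + 1) := by
        simp [pvStepB, hread, hc]
      rw [hstep] at hp
      have hcset : PySem.List.pySetD c kp (PySem.List.pyGetD c (i * maxnz + a) 0)
          = c.set kp.toNat (PySem.List.pyGetD c (i * maxnz + a) 0) :=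
        PySem.List.pySetD_of_nonneg _ _ hkp0
      rw [hcset] at hp
      have hlen' : (c.set kp.toNat (PySem.List.pyGetD c (i * maxnz + a) 0)).length
          = cols0.length := by rw [List.length_set]; exact hlen
      have hget' : ∀ j : Nat, i * maxnz + (a + 1) ≤ (j : Int) →
          (c.set kp.toNat (PySem.List.pyGetD c (i * maxnz + a) 0)).getD j 0
            = cols0.getD j 0 := by
        intro j hj
        rw [pv_getD_set_ne _ _ _ _ (by omega)]
        exact hget j (by omega)
      obtain ⟨h1, h2, h3, h4, h5⟩ := ih (a + 1) (by omega) (by omega) _ _ (kp + 1) hlen'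
        hget' (by omega) (by omega) p hp
      refine ⟨?_, h2, h3, h4, h5⟩
      rw [if_pos hc,
        pv_cnt_shift cols0 maxnz i (PySem.List.pyRange (a + 1) maxnz 1) ((0:Int) + 1)]
      omega

-- Fused outer loop of A = B's compaction outer loop, with IA built by B's prefix-sum pass.
lemma pv_main_aux (cols0 : List Int) (maxnz nrows : Int) (hmz : 0 < maxnz) :
    ∀ (n : Nat), ∀ (a : Int), 0 ≤ a → a + n = nrows →
    ∀ (v c IA : List Int) (kp : Int),
    c.length = cols0.length →
    (∀ j : Nat, a * maxnz ≤ (j : Int) → c.getD j 0 = cols0.getD j 0) →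
    0 ≤ kp → kp ≤ a * maxnz →
    IA.length = (nrows + 1).toNat →
    PySem.List.pyGetD IA a 0 = kp →
    (PySem.List.pyRange a nrows 1).foldl
        (fun s i => (PySem.List.pyRange 0 maxnz 1).foldl (pvStepA maxnz i) s) (v, c, IA, kp)
      = (((PySem.List.pyRange a nrows 1).foldl
            (fun s i => (PySem.List.pyRange 0 maxnz 1).foldl (pvStepB maxnz i) s) (v, c, kp)).1,
         ((PySem.List.pyRange a nrows 1).foldl
            (fun s i => (PySem.List.pyRange 0 maxnz 1).foldl (pvStepB maxnz i) s) (v, c, kp)).2.1,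
         (PySem.List.pyRange a nrows 1).foldl
            (fun IA i => PySem.List.pySetD IA (i + 1) (PySem.List.pyGetD IA i 0 + pvCount cols0 maxnz i)) IA,
         ((PySem.List.pyRange a nrows 1).foldl
            (fun s i => (PySem.List.pyRange 0 maxnz 1).foldl (pvStepB maxnz i) s) (v, c, kp)).2.2) := by
  intro n
  induction n with
  | zero =>
    intro a ha hsum v c IA kp hlen hget hkp0 hkp hIAlen hIA
    rw [PySem.List.pyRange_one_eq_nil (show nrows ≤ a by omega)]
    rfl
  | succ m ih =>
    intro a ha hsum v c IA kp hlen hget hkp0 hkp hIAlen hIA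
    have hcons := PySem.List.pyRange_one_cons (show a < nrows by omega)
    rw [hcons]
    simp only [List.foldl_cons]
    -- the inner k-range is nonempty
    have hkcons := PySem.List.pyRange_one_cons (show (0:Int) < maxnz from hmz)
    have hne : (PySem.List.pyRange 0 maxnz 1).isEmpty = false := by
      rw [hkcons]; rfl
    rw [pv_foldA_eq maxnz a ha, hne]
    simp only [Bool.false_eq_true, if_false]
    -- analyse the inner compaction fold via the row invariants
    obtain ⟨hq1, hq2, hq3, hq4, hq5⟩ := pv_row_aux cols0 maxnz a ha maxnz.toNat 0 le_rfl
      (by omega) v c kp hlen (fun j hj => hget j (by omega)) hkp0 (by omega)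
      ((PySem.List.pyRange 0 maxnz 1).foldl (pvStepB maxnz a) (v, c, kp)) rfl
    have hq1' : ((PySem.List.pyRange 0 maxnz 1).foldl (pvStepB maxnz a) (v, c, kp)).2.2
        = kp + pvCount cols0 maxnz a := by
      rw [hq1]; rfl
    -- B's IA step writes the same value A's fused loop left in IA[a+1]
    have hIAstep : PySem.List.pySetD IA (a + 1)
          (PySem.List.pyGetD IA a 0 + pvCount cols0 maxnz a)
        = PySem.List.pySetD IA (a + 1)
          ((PySem.List.pyRange 0 maxnz 1).foldl (pvStepB maxnz a) (v, c, kp)).2.2 := by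
      rw [hIA, hq1']
    rw [← hIAstep]
    -- set up the recursive call
    have hIAlen' : (PySem.List.pySetD IA (a + 1)
          (PySem.List.pyGetD IA a 0 + pvCount cols0 maxnz a)).length = (nrows + 1).toNat := by
      rw [PySem.List.length_pySetD]; exact hIAlen
    have hIA' : PySem.List.pyGetD (PySem.List.pySetD IA (a + 1)
          (PySem.List.pyGetD IA a 0 + pvCount cols0 maxnz a)) (a + 1) 0
        = kp + pvCount cols0 maxnz a := by
      have hcast : (a + 1 : Int) = (((a + 1).toNat : Nat) : Int) := by omega
      rw [hcast, PySem.List.pySetD_natCast, PySem.List.pyGetD_natCast,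
        pv_getD_set_self _ _ _ (by omega), hIA]
    have hget' : ∀ j : Nat, (a + 1) * maxnz ≤ (j : Int) →
        ((PySem.List.pyRange 0 maxnz 1).foldl (pvStepB maxnz a) (v, c, kp)).2.1.getD j 0
          = cols0.getD j 0 := by
      intro j hj
      exact hq3 j (by nlinarith [hj])
    rcases hq : (PySem.List.pyRange 0 maxnz 1).foldl (pvStepB maxnz a) (v, c, kp)
      with ⟨v1, c1, kp1⟩
    rw [hq] at hq1' hq2 hq4 hq5 hget'
    exact ih (a + 1) (by omega) (by omega) v1 c1 _ kp1 hq2 hget' hq4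
      (by rw [show (a + 1) * maxnz = a * maxnz + maxnz from by ring]; exact hq5)
      hIAlen' (hIA'.trans hq1'.symm)

-- with maxnz ≤ 0 every row count is 0, so B's prefix-sum pass leaves IA all zeros
lemma pv_IA_zeros (cols0 : List Int) (maxnz nrows : Int) (hmz : maxnz ≤ 0) (mm : Nat) :
    ∀ (n : Nat), ∀ (a : Int), 0 ≤ a → a + n = nrows →
    (PySem.List.pyRange a nrows 1).foldl
      (fun IA i => PySem.List.pySetD IA (i + 1) (PySem.List.pyGetD IA i 0 + pvCount cols0 maxnz i))
      (List.replicate mm 0) = List.replicate mm 0 := by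
  intro n
  induction n with
  | zero => intro a ha hs; rw [PySem.List.pyRange_one_eq_nil (by omega)]; rfl
  | succ k ih =>
    intro a ha hs
    rw [PySem.List.pyRange_one_cons (show a < nrows by omega), List.foldl_cons]
    have hcnt : pvCount cols0 maxnz a = 0 := by
      unfold pvCount; rw [PySem.List.pyRange_one_eq_nil (by omega)]; rfl
    have hget : PySem.List.pyGetD (List.replicate mm (0:Int)) a 0 = 0 := by
      have hcast : (a : Int) = ((a.toNat : Nat) : Int) := by omega
      rw [hcast, PySem.List.pyGetD_natCast]; exact pv_getD_replicate_zero mm a.toNat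
    have hset : PySem.List.pySetD (List.replicate mm (0:Int)) (a + 1) 0 = List.replicate mm 0 := by
      have hcast : (a + 1 : Int) = (((a + 1).toNat : Nat) : Int) := by omega
      rw [hcast, PySem.List.pySetD_natCast]; exact pv_set_replicate_zero mm (a + 1).toNat
    rw [hcnt, hget, add_zero, hset]
    exact ih (a + 1) (by omega) (by omega)

-- ===== VERDICT (by name: the statement is the Claim_ definition above) =====
theorem ellcsrip_spec : Claim_equal_ellcsrip := by
  intro cols vals nrows maxnz _hdom _hpre
  unfold Spec_ellcsrip ellcsrip ellcsrip_alt
  by_cases hn : nrows < 0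
  · rw [PySem.List.pyRange_one_eq_nil (show nrows ≤ 0 by omega)]
    rfl
  · by_cases hm : maxnz ≤ 0
    · rw [PySem.List.pyRange_one_eq_nil (show maxnz ≤ 0 from hm)]
      simp only [List.foldl_nil]
      rw [pv_foldl_const, pv_foldl_const,
        pv_IA_zeros cols maxnz nrows hm (nrows + 1).toNat nrows.toNat 0 le_rfl (by omega)]
    · have h := pv_main_aux cols maxnz nrows (by omega) nrows.toNat 0 le_rfl (by omega)
        vals cols (List.replicate (nrows + 1).toNat 0) 0 rfl (fun j _ => rfl) le_rfl
        (by simp) (by simp) (by rw [PySem.List.pyGetD_zero]; exact pv_getD_replicate_zero _ 0)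
      rw [h]
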